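-- pv_equiv track=rewrite | github.com/rani-maklada/Search-Algorithms | search_algorithms.py | state_to_key
-- ===== SOURCE A (Python) =====
-- def state_to_key(state):
--     a = 1
--     sum = 0
--     for i in range(len(state)):
--         for j in range(len(state[0])):
--             sum = sum + state[i][j] * a
--             a = a * 10
--     return sum
-- ===== SOURCE B (Python) =====
-- def state_to_key(state):
--     if not state:
--         return 0
--     cols = len(state[0])
--     row_keys = [sum(state[i][j] * 10**j for j in range(cols)) for i in range(len(state))]
--     base = 10**cols
--     return sum(r * base**i for i, r in enumerate(row_keys))
-- ===== Notes on version B (the rewrite author's own statement) =====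
-- stated objective: alternative
-- what changed: B is a staged, row-wise computation: it first computes each row's own key with closed-form powers 10**j (no running multiplier), then combines the per-row keys as a polynomial in base 10**cols via enumerate, instead of A's single nested loop threading one power-of-ten accumulator across the whole grid.
import Mathlib
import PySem

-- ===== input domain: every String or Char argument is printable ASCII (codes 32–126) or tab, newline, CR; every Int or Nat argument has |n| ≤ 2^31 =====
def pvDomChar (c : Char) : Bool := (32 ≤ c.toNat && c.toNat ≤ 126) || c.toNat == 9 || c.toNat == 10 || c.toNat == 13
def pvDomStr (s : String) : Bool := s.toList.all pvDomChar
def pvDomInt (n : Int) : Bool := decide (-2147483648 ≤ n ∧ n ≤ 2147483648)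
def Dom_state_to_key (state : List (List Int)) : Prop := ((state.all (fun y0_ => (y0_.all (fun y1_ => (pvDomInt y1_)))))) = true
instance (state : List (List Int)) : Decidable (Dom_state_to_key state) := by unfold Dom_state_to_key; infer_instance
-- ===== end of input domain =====

-- B computes the key in stages — each row's own key with closed-form powers 10^j, then the
-- per-row keys combined as a polynomial in base 10^cols — instead of A's single nested loop
-- threading one running power-of-ten accumulator (alternative decomposition, same cost).
-- Pre_ excludes grids where some row is shorter than the first row (Python A raises IndexError).


-- ===== PORT A =====
-- literal transliteration of A: nested index loops over range(len(state)) × range(len(state[0]))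
-- carrying the pair (sum, a); out-of-range indexing (IndexError in Python, excluded by Pre_)
-- is defaulted via getD.
def state_to_key (state : List (List Int)) : Int :=
  ((PySem.List.pyRange 0 (state.length : Int) 1).foldl
    (fun (p : Int × Int) i =>
      (PySem.List.pyRange 0 (((PySem.List.pyGet? state 0).getD []).length : Int) 1).foldl
        (fun (q : Int × Int) j =>
          (q.1 + ((PySem.List.pyGet? ((PySem.List.pyGet? state i).getD []) j).getD 0) * q.2,
           q.2 * 10)) p)
    (0, 1)).1

-- ===== PORT B =====
-- transliteration of B: per-row keys with closed-form powers 10^j, then the rows combined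
-- as a polynomial in base 10^cols via enumerate.
def state_to_key_alt (state : List (List Int)) : Int :=
  if state = [] then 0
  else
    let cols := ((PySem.List.pyGet? state 0).getD []).length
    let rowKeys := (PySem.List.pyRange 0 (state.length : Int) 1).map (fun i =>
      (((PySem.List.pyRange 0 (cols : Int) 1).map (fun j =>
        ((PySem.List.pyGet? ((PySem.List.pyGet? state i).getD []) j).getD 0) * 10 ^ j.toNat)).sum))
    let base : Int := 10 ^ cols
    ((PySem.List.enumerate rowKeys).map (fun p => p.2 * base ^ p.1.toNat)).sum

-- ===== PRECONDITION & SPEC =====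
-- Pre_ excludes exactly the inputs where Python A raises IndexError: a row shorter than row 0.
def Pre_state_to_key (state : List (List Int)) : Prop :=
  ∀ row ∈ state, (state.headD []).length ≤ row.length
instance (state : List (List Int)) : Decidable (Pre_state_to_key state) := by
  unfold Pre_state_to_key; infer_instance
def pvWitness_state_to_key : List (List Int) := [[1, 2], [3, 4]]

def Spec_state_to_key (state : List (List Int)) (out : Int) : Prop := out = state_to_key_alt state
instance (state : List (List Int)) (out : Int) : Decidable (Spec_state_to_key state out) := by unfold Spec_state_to_key; infer_instance

-- ===== CLAIM (what is proved, stated in full; the proofs are below) =====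
def Claim_equal_state_to_key : Prop := ∀ (state : List (List Int)), Dom_state_to_key state → Pre_state_to_key state → Spec_state_to_key state (state_to_key state)

-- ===== LEMMAS AND PROOFS =====

-- generic: a pair-carrying fold with multiplier step b, over any cell list l, starting at (s, a)
lemma pair_foldl_closed (b : Int) (l : List Int) (s a : Int) :
    (l.foldl (fun (q : Int × Int) v => (q.1 + v * q.2, q.2 * b)) (s, a))
      = (s + a * (l.foldr (fun v acc => v + b * acc) 0), a * b ^ l.length) := by
  induction l generalizing s a with
  | nil => simp
  | cons v l ih =>
    simp only [List.foldl_cons, List.foldr_cons, ih, List.length_cons, pow_succ,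
      Prod.mk.injEq]
    constructor <;> ring

-- a foldr polynomial with a nonzero seed: the seed is weighted by b ^ length
lemma foldr_poly_seed (b : Int) (l : List Int) (c : Int) :
    l.foldr (fun v acc => v + b * acc) c
      = l.foldr (fun v acc => v + b * acc) 0 + b ^ l.length * c := by
  induction l with
  | nil => simp
  | cons v l ihl => simp only [List.foldr_cons, ihl, List.length_cons, pow_succ]; ring

-- B's closed-power indexed sum over range(n) equals the foldr polynomial of the mapped list
lemma sum_pow_eq_foldr (g : Int → Int) (n : Nat) :
    (((PySem.List.pyRange 0 (n : Int) 1).map (fun j => g j * 10 ^ j.toNat)).sum)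
      = (((PySem.List.pyRange 0 (n : Int) 1).map g).foldr (fun v acc => v + 10 * acc) 0) := by
  induction n with
  | zero => simp
  | succ n ih =>
    have hc : ((n + 1 : Nat) : Int) = (n : Int) + 1 := by push_cast; ring
    rw [hc, PySem.List.pyRange_one_succ_right (by positivity), List.map_append, List.map_append,
      List.sum_append, List.foldr_append, ih]
    simp only [List.map_cons, List.map_nil, List.sum_cons, List.sum_nil, List.foldr_cons,
      List.foldr_nil]
    conv_rhs => rw [foldr_poly_seed]
    rw [List.length_map, PySem.List.length_pyRange_one]
    simp only [sub_zero, Int.toNat_natCast]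
    ring

-- B's enumerate-based row combination equals the foldr polynomial in base b (any start offset)
lemma enum_sum_eq_foldr (b : Int) (l : List Int) (s : Nat) :
    ((PySem.List.enumerate l (s : Int)).map (fun p => p.2 * b ^ p.1.toNat)).sum
      = b ^ s * (l.foldr (fun v acc => v + b * acc) 0) := by
  induction l generalizing s with
  | nil => simp [PySem.List.enumerate_nil]
  | cons v l ih =>
    rw [PySem.List.enumerate_cons]
    have hc : ((s : Int) + 1) = ((s + 1 : Nat) : Int) := by push_cast; ring
    simp only [List.map_cons, List.sum_cons, hc, ih, List.foldr_cons, Int.toNat_natCast,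
      pow_succ]
    ring

-- enum_sum_eq_foldr at start 0, in the form the port mentions
lemma enum_sum_eq_foldr_zero (b : Int) (l : List Int) :
    ((PySem.List.enumerate l 0).map (fun p => p.2 * b ^ p.1.toNat)).sum
      = l.foldr (fun v acc => v + b * acc) 0 := by
  simpa using enum_sum_eq_foldr b l 0

-- A's nested index loops equal B's staged shape: foldr in base 10^C over the per-row foldr polys
lemma nested_key (C : Nat) (g : Int → Int → Int) (R : List Int) :
    (R.foldl (fun (p : Int × Int) i =>
        (PySem.List.pyRange 0 (C : Int) 1).foldl
          (fun (q : Int × Int) j => (q.1 + g i j * q.2, q.2 * 10)) p) (0, 1)).1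
      = (R.map (fun i =>
          ((PySem.List.pyRange 0 (C : Int) 1).map (g i)).foldr (fun v acc => v + 10 * acc) 0)).foldr
          (fun v acc => v + (10 ^ C : Int) * acc) 0 := by
  have key : ∀ (R : List Int) (s a : Int),
      (R.foldl (fun (p : Int × Int) i =>
        (PySem.List.pyRange 0 (C : Int) 1).foldl
          (fun (q : Int × Int) j => (q.1 + g i j * q.2, q.2 * 10)) p) (s, a))
      = (s + a * ((R.map (fun i =>
            ((PySem.List.pyRange 0 (C : Int) 1).map (g i)).foldr (fun v acc => v + 10 * acc) 0)).foldr
            (fun v acc => v + (10 ^ C : Int) * acc) 0),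
         a * ((10 : Int) ^ C) ^ R.length) := by
    intro R
    induction R with
    | nil => intro s a; simp
    | cons i R ihR =>
      intro s a
      simp only [List.foldl_cons]
      have hinner :
          ((PySem.List.pyRange 0 (C : Int) 1).foldl
            (fun (q : Int × Int) j => (q.1 + g i j * q.2, q.2 * 10)) (s, a))
          = (s + a * (((PySem.List.pyRange 0 (C : Int) 1).map (g i)).foldr
              (fun v acc => v + 10 * acc) 0), a * 10 ^ C) := by
        have h := pair_foldl_closed 10 ((PySem.List.pyRange 0 (C : Int) 1).map (g i)) s a
        rw [List.foldl_map] at h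
        simpa [PySem.List.length_pyRange_one, Int.toNat_natCast] using h
      rw [hinner, ihR]
      simp only [List.map_cons, List.foldr_cons, List.length_cons, pow_succ, Prod.mk.injEq]
      constructor <;> ring
  rw [key]
  ring

-- ===== VERDICT (by name: the statement is the Claim_ definition above) =====
theorem state_to_key_spec : Claim_equal_state_to_key := by
  intro state _ _
  show state_to_key state = state_to_key_alt state
  by_cases hnil : state = []
  · subst hnil
    simp [state_to_key, state_to_key_alt]
  · unfold state_to_key state_to_key_alt
    simp only [if_neg hnil]
    rw [enum_sum_eq_foldr_zero]
    rw [List.map_congr_left (fun i _ => sum_pow_eq_foldr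
      (fun j => ((PySem.List.pyGet? ((PySem.List.pyGet? state i).getD []) j).getD 0))
      (((PySem.List.pyGet? state 0).getD []).length))]
    exact nested_key (((PySem.List.pyGet? state 0).getD []).length)
      (fun i j => ((PySem.List.pyGet? ((PySem.List.pyGet? state i).getD []) j).getD 0)) _
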